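-- pv_equiv track=rewrite | github.com/Rohitjanardhan21/NeuraTwin---A-Cognitive-Digital-Twin | core/pattern_analyzer.py | _analyze_outcomes
-- ===== SOURCE A (Python) =====
-- from typing import List, Dict
--
-- def _analyze_outcomes(decisions: List[Dict]):
--     """Analyze decision outcomes"""
--     outcomes = {"success": 0, "failure": 0, "unknown": 0}
--
--     for dec in decisions:
--         outcome = dec.get("outcome", "").lower()
--         if outcome in ["success", "successful", "good"]:
--             outcomes["success"] += 1
--         elif outcome in ["failure", "failed", "bad"]:
--             outcomes["failure"] += 1
--         else:
--             outcomes["unknown"] += 1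
--
--     return outcomes
-- ===== SOURCE B (Python) =====
-- def _analyze_outcomes(decisions):
--     """Analyze decision outcomes"""
--     outs = [dec.get("outcome", "").lower() for dec in decisions]
--     success = sum(1 for o in outs if o in ("success", "successful", "good"))
--     failure = sum(1 for o in outs if o in ("failure", "failed", "bad"))
--     return {"success": success, "failure": failure,
--             "unknown": len(outs) - success - failure}
-- ===== Notes on version B (the rewrite author's own statement) =====
-- stated objective: alternative
-- what changed: B lowercases all outcomes once, counts the success and failure buckets with separate counting passes, and derives unknown by subtraction (len - success - failure) instead of an else-branch in a single dict-updating loop.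
import Mathlib
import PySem

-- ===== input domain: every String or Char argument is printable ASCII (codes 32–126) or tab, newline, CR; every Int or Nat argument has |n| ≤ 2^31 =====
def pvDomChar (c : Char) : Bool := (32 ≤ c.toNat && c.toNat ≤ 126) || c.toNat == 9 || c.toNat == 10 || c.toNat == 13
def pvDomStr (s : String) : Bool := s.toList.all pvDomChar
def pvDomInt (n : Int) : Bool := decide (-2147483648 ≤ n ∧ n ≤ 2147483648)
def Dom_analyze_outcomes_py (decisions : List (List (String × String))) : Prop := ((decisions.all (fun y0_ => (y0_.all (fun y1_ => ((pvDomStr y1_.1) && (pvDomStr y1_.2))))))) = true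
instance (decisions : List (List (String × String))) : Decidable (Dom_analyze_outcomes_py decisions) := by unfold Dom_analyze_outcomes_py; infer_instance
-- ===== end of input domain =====

-- B counts the success and failure buckets by separate counting passes over the
-- lowercased outcomes and derives unknown by subtraction; same O(n) cost (objective: alternative).

-- ===== PORT A =====
def analyze_outcomes_py (decisions : List (List (String × String))) : List (String × Int) :=
  let init : PySem.Dict String Int :=
    ((PySem.Dict.empty.insert "success" 0).insert "failure" 0).insert "unknown" 0
  let final := decisions.foldl (fun outcomes dec =>
    let outcome := PySem.Str.lower ((PySem.Dict.mk dec).getD "outcome" "")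
    if (["success", "successful", "good"] : List String).contains outcome then
      outcomes.modify "success" 0 (· + 1)
    else if (["failure", "failed", "bad"] : List String).contains outcome then
      outcomes.modify "failure" 0 (· + 1)
    else
      outcomes.modify "unknown" 0 (· + 1)) init
  final.items

-- ===== PORT B =====
def analyze_outcomes_py_alt (decisions : List (List (String × String))) : List (String × Int) :=
  let outs := decisions.map (fun dec => PySem.Str.lower ((PySem.Dict.mk dec).getD "outcome" ""))
  let success : Int := outs.countP (fun o => (["success", "successful", "good"] : List String).contains o)
  let failure : Int := outs.countP (fun o => (["failure", "failed", "bad"] : List String).contains o)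
  [("success", success), ("failure", failure), ("unknown", (outs.length : Int) - success - failure)]

-- ===== PRECONDITION & SPEC =====
def Spec_analyze_outcomes_py (decisions : List (List (String × String))) (out : List (String × Int)) : Prop := out = analyze_outcomes_py_alt decisions
instance (decisions : List (List (String × String))) (out : List (String × Int)) : Decidable (Spec_analyze_outcomes_py decisions out) := by unfold Spec_analyze_outcomes_py; infer_instance

-- ===== CLAIM (what is proved, stated in full; the proofs are below) =====
def Claim_equal_analyze_outcomes_py : Prop := ∀ (decisions : List (List (String × String))), Dom_analyze_outcomes_py decisions → Spec_analyze_outcomes_py decisions (analyze_outcomes_py decisions)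

-- ===== LEMMAS AND PROOFS =====

-- abbreviations used only by the proofs
def pvOut (dec : List (String × String)) : String :=
  PySem.Str.lower ((PySem.Dict.mk dec).getD "outcome" "")
def pvPS (o : String) : Bool := (["success", "successful", "good"] : List String).contains o
def pvPF (o : String) : Bool := (["failure", "failed", "bad"] : List String).contains o
def pvPU (o : String) : Bool := !(pvPS o || pvPF o)
def pvStep (outcomes : PySem.Dict String Int) (dec : List (String × String)) : PySem.Dict String Int :=
  if pvPS (pvOut dec) then outcomes.modify "success" 0 (· + 1)
  else if pvPF (pvOut dec) then outcomes.modify "failure" 0 (· + 1)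
  else outcomes.modify "unknown" 0 (· + 1)

lemma pvFold_eq (l : List (List (String × String))) (d : PySem.Dict String Int) :
    l.foldl (fun outcomes dec =>
      let outcome := PySem.Str.lower ((PySem.Dict.mk dec).getD "outcome" "")
      if (["success", "successful", "good"] : List String).contains outcome then
        outcomes.modify "success" 0 (· + 1)
      else if (["failure", "failed", "bad"] : List String).contains outcome then
        outcomes.modify "failure" 0 (· + 1)
      else
        outcomes.modify "unknown" 0 (· + 1)) d = l.foldl pvStep d := rfl

lemma pvDisj (x : String) (h1 : pvPS x = true) (h2 : pvPF x = true) : False := by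
  simp [pvPS] at h1; simp [pvPF] at h2
  rcases h1 with rfl | rfl | rfl <;> simp at h2

lemma pvKeys_step (d : PySem.Dict String Int) (dec : List (String × String))
    (h : d.keys = ["success", "failure", "unknown"]) :
    (pvStep d dec).keys = ["success", "failure", "unknown"] := by
  unfold pvStep
  split_ifs <;> rw [PySem.Dict.keys_modify] <;>
    simp [PySem.Dict.keys_insert_of_contains, PySem.Dict.contains_iff_mem_keys, h]

lemma pvKeys_fold (l : List (List (String × String))) (d : PySem.Dict String Int)
    (h : d.keys = ["success", "failure", "unknown"]) :
    (l.foldl pvStep d).keys = ["success", "failure", "unknown"] := by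
  induction l generalizing d with
  | nil => simpa using h
  | cons x xs ih => exact ih _ (pvKeys_step d x h)

lemma pvGetD_fold (l : List (List (String × String))) (d : PySem.Dict String Int) :
    (l.foldl pvStep d).getD "success" 0 = d.getD "success" 0 + ((l.map pvOut).countP pvPS : Int) ∧
    (l.foldl pvStep d).getD "failure" 0 = d.getD "failure" 0 + ((l.map pvOut).countP pvPF : Int) ∧
    (l.foldl pvStep d).getD "unknown" 0 = d.getD "unknown" 0 + ((l.map pvOut).countP pvPU : Int) := by
  induction l generalizing d with
  | nil => simp
  | cons x xs ih =>
    obtain ⟨hs, hf, hu⟩ := ih (pvStep d x)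
    have hPU : pvPU (pvOut x) = (!(pvPS (pvOut x) || pvPF (pvOut x))) := rfl
    refine ⟨?_, ?_, ?_⟩ <;>
      simp only [List.foldl_cons, hs, hf, hu, List.map_cons, List.countP_cons] <;>
      unfold pvStep <;> split_ifs with h1 h2 <;>
      simp_all [PySem.Dict.getD_modify] <;> first | omega | exact (pvDisj _ h1 h2).elim

lemma pvCount_split (outs : List String) :
    outs.countP pvPS + outs.countP pvPF + outs.countP pvPU = outs.length := by
  induction outs with
  | nil => simp
  | cons x xs ih =>
    have hu : pvPU x = !(pvPS x || pvPF x) := rfl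
    simp only [List.countP_cons, List.length_cons]
    cases h1 : pvPS x <;> cases h2 : pvPF x <;> rw [h1, h2] at hu <;>
      first
        | exact (pvDisj x h1 h2).elim
        | (simp [hu]; omega)

-- ===== VERDICT (by name: the statement is the Claim_ definition above) =====
theorem analyze_outcomes_py_spec : Claim_equal_analyze_outcomes_py := by
  intro decisions _
  unfold Spec_analyze_outcomes_py analyze_outcomes_py analyze_outcomes_py_alt
  simp only [pvFold_eq]
  set init : PySem.Dict String Int :=
    ((PySem.Dict.empty.insert "success" 0).insert "failure" 0).insert "unknown" 0 with hinit
  have hkinit : init.keys = ["success", "failure", "unknown"] := by decide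
  have hkeys := pvKeys_fold decisions init hkinit
  obtain ⟨hs, hf, hu⟩ := pvGetD_fold decisions init
  have hnd : (decisions.foldl pvStep init).keys.Nodup := by rw [hkeys]; decide
  have hitems := PySem.Dict.items_eq_map_keys (decisions.foldl pvStep init) hnd (0 : Int)
  have hinit_s : init.getD "success" (0 : Int) = 0 := by decide
  have hinit_f : init.getD "failure" (0 : Int) = 0 := by decide
  have hinit_u : init.getD "unknown" (0 : Int) = 0 := by decide
  rw [hitems, hkeys]
  have hcount := pvCount_split (decisions.map pvOut)
  simp only [List.map_cons, List.map_nil, hs, hf, hu, hinit_s, hinit_f, hinit_u, zero_add]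
  unfold pvOut pvPS pvPF pvPU at hcount ⊢
  simp only [List.length_map] at hcount ⊢
  simp only [List.cons.injEq, Prod.mk.injEq, and_true, true_and]
  omega
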